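-- pv_equiv track=rewrite | github.com/Kean-CST/house-data-etl-sudzoof | tests/compare_csvs.py | rows_equal
-- ===== SOURCE A (Python) =====
-- def rows_equal(expected_row, actual_row):
--     """Compare two rows with boolean case insensitivity"""
--     if len(expected_row) != len(actual_row):
--         return False
--
--     for e, a in zip(expected_row, actual_row):
--         # Check if both are boolean strings (case-insensitive)
--         if isinstance(e, str) and isinstance(a, str):
--             if e.lower() in ("true", "false") and a.lower() in ("true", "false"):
--                 if e.lower() != a.lower():
--                     return False
--                 continue
--         # Regular comparison for non-boolean values
--         if e != a:
--             return False
--     return True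
-- ===== SOURCE B (Python) =====
-- def _norm(x):
--     if isinstance(x, str):
--         low = x.lower()
--         if low in ("true", "false"):
--             return low
--     return x
--
--
-- def rows_equal(expected_row, actual_row):
--     """Compare two rows with boolean case insensitivity"""
--     return [_norm(x) for x in expected_row] == [_norm(x) for x in actual_row]
-- ===== Notes on version B (the rewrite author's own statement) =====
-- stated objective: simpler
-- what changed: B canonicalizes each row by lowercasing boolean-looking strings and compares the two normalized lists in one whole-list equality, instead of A's interleaved per-element boolean-branch loop with an explicit length check.
import Mathlib
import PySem

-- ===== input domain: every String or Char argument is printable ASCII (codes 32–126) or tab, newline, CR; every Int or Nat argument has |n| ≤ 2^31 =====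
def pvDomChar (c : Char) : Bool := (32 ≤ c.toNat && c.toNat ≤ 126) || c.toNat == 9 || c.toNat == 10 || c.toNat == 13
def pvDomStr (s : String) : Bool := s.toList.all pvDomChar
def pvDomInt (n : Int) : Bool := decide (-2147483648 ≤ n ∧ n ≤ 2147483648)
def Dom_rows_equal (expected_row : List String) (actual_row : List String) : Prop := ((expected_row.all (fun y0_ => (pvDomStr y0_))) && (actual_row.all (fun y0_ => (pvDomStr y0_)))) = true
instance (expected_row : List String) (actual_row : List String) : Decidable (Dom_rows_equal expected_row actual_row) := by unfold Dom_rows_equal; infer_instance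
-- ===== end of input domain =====

-- B canonicalizes each row (lowercasing boolean-looking strings) and compares the
-- normalized lists in one whole-list equality; objective: simpler.

-- ===== PORT A =====
-- the for-loop over zip(expected_row, actual_row), with the same branch order
def rowsEqualLoop : List (String × String) → Bool
  | [] => true
  | (e, a) :: rest =>
    if (PySem.Str.lower e = "true" ∨ PySem.Str.lower e = "false") ∧
       (PySem.Str.lower a = "true" ∨ PySem.Str.lower a = "false") then
      if PySem.Str.lower e ≠ PySem.Str.lower a then false
      else rowsEqualLoop rest
    else
      if e ≠ a then false
      else rowsEqualLoop rest

def rows_equal (expected_row : List String) (actual_row : List String) : Bool :=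
  if expected_row.length ≠ actual_row.length then false
  else rowsEqualLoop (expected_row.zip actual_row)

-- ===== PORT B =====
def normCell (x : String) : String :=
  let low := PySem.Str.lower x
  if low = "true" ∨ low = "false" then low else x

def rows_equal_alt (expected_row : List String) (actual_row : List String) : Bool :=
  expected_row.map normCell == actual_row.map normCell

-- ===== PRECONDITION & SPEC =====
def Spec_rows_equal (expected_row : List String) (actual_row : List String) (out : Bool) : Prop := out = rows_equal_alt expected_row actual_row
instance (expected_row : List String) (actual_row : List String) (out : Bool) : Decidable (Spec_rows_equal expected_row actual_row out) := by unfold Spec_rows_equal; infer_instance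

-- ===== CLAIM (what is proved, stated in full; the proofs are below) =====
def Claim_equal_rows_equal : Prop := ∀ (expected_row : List String) (actual_row : List String), Dom_rows_equal expected_row actual_row → Spec_rows_equal expected_row actual_row (rows_equal expected_row actual_row)

-- ===== LEMMAS AND PROOFS =====

theorem lower_true : PySem.Str.lower "true" = "true" := by decide

theorem lower_false : PySem.Str.lower "false" = "false" := by decide

-- per-cell: A's branch test agrees with comparing the normalized cells
theorem normCell_eq_iff (e a : String) :
    (normCell e = normCell a) ↔
      (if (PySem.Str.lower e = "true" ∨ PySem.Str.lower e = "false") ∧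
          (PySem.Str.lower a = "true" ∨ PySem.Str.lower a = "false")
       then PySem.Str.lower e = PySem.Str.lower a
       else e = a) := by
  unfold normCell
  by_cases he : PySem.Str.lower e = "true" ∨ PySem.Str.lower e = "false" <;>
    by_cases ha : PySem.Str.lower a = "true" ∨ PySem.Str.lower a = "false"
  · rw [if_pos he, if_pos ha, if_pos ⟨he, ha⟩]
  · rw [if_pos he, if_neg ha, if_neg (fun h => ha h.2)]
    constructor
    · intro h
      exfalso
      apply ha
      rcases he with h' | h'
      · rw [← h, h', lower_true]; exact Or.inl rfl
      · rw [← h, h', lower_false]; exact Or.inr rfl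
    · intro h
      exfalso
      exact ha (h ▸ he)
  · rw [if_neg he, if_pos ha, if_neg (fun h => he h.1)]
    constructor
    · intro h
      exfalso
      apply he
      rcases ha with h' | h'
      · rw [h, h', lower_true]; exact Or.inl rfl
      · rw [h, h', lower_false]; exact Or.inr rfl
    · intro h
      exfalso
      exact he (h ▸ ha)
  · rw [if_neg he, if_neg ha, if_neg (fun h => he h.1)]

theorem loop_eq_norm : ∀ (es as : List String), es.length = as.length →
    rowsEqualLoop (es.zip as) = (es.map normCell == as.map normCell)
  | [], [], _ => by simp [rowsEqualLoop]
  | [], _ :: _, h => by simp at h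
  | _ :: _, [], h => by simp at h
  | e :: es, a :: as, h => by
    have hlen : es.length = as.length := by simpa using h
    have ih := loop_eq_norm es as hlen
    have hcell := normCell_eq_iff e a
    simp only [List.zip_cons_cons, rowsEqualLoop, List.map_cons]
    by_cases hb : (PySem.Str.lower e = "true" ∨ PySem.Str.lower e = "false") ∧
        (PySem.Str.lower a = "true" ∨ PySem.Str.lower a = "false")
    · rw [if_pos hb] at hcell
      rw [if_pos hb]
      by_cases hl : PySem.Str.lower e = PySem.Str.lower a
      · rw [if_neg (not_not_intro hl)]
        have hn : normCell e = normCell a := hcell.mpr hl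
        simp [ih, hn]
      · rw [if_pos hl]
        have hn : ¬ normCell e = normCell a := fun h' => hl (hcell.mp h')
        simp [hn]
    · rw [if_neg hb] at hcell
      rw [if_neg hb]
      by_cases heq : e = a
      · rw [if_neg (not_not_intro heq)]
        have hn : normCell e = normCell a := hcell.mpr heq
        simp [ih, hn]
      · rw [if_pos heq]
        have hn : ¬ normCell e = normCell a := fun h' => heq (hcell.mp h')
        simp [hn]

-- ===== VERDICT (by name: the statement is the Claim_ definition above) =====
theorem rows_equal_spec : Claim_equal_rows_equal := by
  intro es as _
  unfold Spec_rows_equal rows_equal rows_equal_alt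
  by_cases h : es.length = as.length
  · rw [if_neg (not_not_intro h)]
    exact loop_eq_norm es as h
  · rw [if_pos h]
    have hm : ¬ es.map normCell = as.map normCell := by
      intro hm
      apply h
      have := congrArg List.length hm
      simpa using this
    simp [hm]
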